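-- pv_equiv track=rewrite | github.com/Marghrid/Algorithms-for-Computational-Logic | Proj2/enc.py | mk_or_list
-- ===== SOURCE A (Python) =====
-- def mk_or_list(or_list):
-- 	assert or_list is not None
--
-- 	if len(or_list) == 0:
-- 		return ""
--
-- 	if len(or_list) == 1: # so it doesn't have two '((', '))'.
-- 		return or_list[0]
--
-- 	# [a, b, c, d] becomes
-- 	# (or a (or b (or c d)))
-- 	ret_str = ''
-- 	for atom in or_list[:-1]:
-- 		ret_str += f'(or {atom} '
-- 	ret_str += f'{or_list[-1]}' + (len(or_list)-1)*')'
--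
-- 	return ret_str
-- ===== SOURCE B (Python) =====
-- def mk_or_list(or_list):
--     assert or_list is not None
--     if not or_list:
--         return ""
--     acc = or_list[-1]
--     for atom in reversed(or_list[:-1]):
--         acc = '(or ' + atom + ' ' + acc + ')'
--     return acc
-- ===== Notes on version B (the rewrite author's own statement) =====
-- stated objective: alternative
-- what changed: Assembles the nested expression back-to-front by wrapping '(or atom ...)' around an accumulator while walking the reversed prefix, instead of A's left-to-right '(or atom ' appends followed by a counted trailing run of ')' characters; the singleton case falls out of the empty loop instead of an explicit branch.
import Mathlib
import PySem

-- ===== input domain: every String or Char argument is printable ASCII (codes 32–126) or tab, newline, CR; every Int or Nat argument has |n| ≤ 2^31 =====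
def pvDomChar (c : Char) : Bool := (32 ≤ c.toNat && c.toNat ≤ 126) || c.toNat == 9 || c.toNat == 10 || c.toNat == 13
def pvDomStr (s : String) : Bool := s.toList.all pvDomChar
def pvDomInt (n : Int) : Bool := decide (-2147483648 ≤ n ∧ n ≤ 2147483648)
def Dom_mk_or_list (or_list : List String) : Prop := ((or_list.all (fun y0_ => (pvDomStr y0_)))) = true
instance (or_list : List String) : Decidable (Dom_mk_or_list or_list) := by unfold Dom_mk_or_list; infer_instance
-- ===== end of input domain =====

-- B assembles the nested string back-to-front, wrapping '(or atom ...)' around an accumulator over the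
-- reversed prefix, instead of A's left-to-right appends plus a counted run of ')' ; objective: alternative.

-- ===== PORT A =====
-- literal port of A: empty / singleton base cases, then a foldl over or_list[:-1]
-- appending '(or <atom> ', then the last element and (len-1) closing parens.
def mk_or_list (or_list : List String) : String :=
  if or_list.length == 0 then "" else
  if or_list.length == 1 then PySem.List.pyGetD or_list 0 "" else
    let ret : List Char :=
      (PySem.List.slice or_list none (some (-1))).foldl
        (fun acc atom => acc ++ ("(or ".toList ++ atom.toList ++ " ".toList)) []
    String.ofList (ret ++ (PySem.List.pyGetD or_list (-1) "").toList
                   ++ List.replicate (or_list.length - 1) ')')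

-- ===== PORT B =====
-- literal port of B: '' for []; else acc starts at or_list[-1] and
-- for atom in reversed(or_list[:-1]): acc = '(or ' + atom + ' ' + acc + ')'.
def mk_or_list_alt (or_list : List String) : String :=
  match or_list with
  | [] => ""
  | _ =>
    (PySem.List.slice or_list none (some (-1))).reverse.foldl
      (fun acc atom => "(or " ++ atom ++ " " ++ acc ++ ")")
      (PySem.List.pyGetD or_list (-1) "")

-- ===== PRECONDITION & SPEC =====
def Spec_mk_or_list (or_list : List String) (out : String) : Prop := out = mk_or_list_alt or_list
instance (or_list : List String) (out : String) : Decidable (Spec_mk_or_list or_list out) := by unfold Spec_mk_or_list; infer_instance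

-- ===== CLAIM (what is proved, stated in full; the proofs are below) =====
def Claim_equal_mk_or_list : Prop := ∀ (or_list : List String), Dom_mk_or_list or_list → Spec_mk_or_list or_list (mk_or_list or_list)

-- ===== LEMMAS AND PROOFS =====

-- B's reversed-foldl as a foldr; its characters by induction on the prefix
theorem alt_go_chars (xs : List String) (z : String) :
    (xs.foldr (fun atom acc => "(or " ++ atom ++ " " ++ acc ++ ")") z).toList
      = xs.flatMap (fun a => "(or ".toList ++ a.toList ++ " ".toList)
          ++ z.toList ++ List.replicate xs.length ')' := by
  induction xs with
  | nil => simp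
  | cons x xs ih =>
      rw [List.foldr_cons]
      simp only [String.toList_append, ih]
      simp [List.replicate_succ' (n := xs.length)]

theorem mk_or_list_spec_aux (l : List String) :
    mk_or_list l = mk_or_list_alt l := by
  match l with
  | [] => rfl
  | [x] =>
      simp [mk_or_list, mk_or_list_alt, PySem.List.pyGetD_zero_cons,
            PySem.List.slice_to_neg_one, PySem.List.pyGetD_neg_one [x] "" (by simp)]
  | x :: y :: t =>
      unfold mk_or_list mk_or_list_alt
      rw [if_neg (by simp), if_neg (by simp)]
      simp only []
      rw [PySem.List.slice_to_neg_one,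
          PySem.List.foldl_append_eq_flatMap
            (g := fun (a : String) => "(or ".toList ++ a.toList ++ " ".toList)
            (l := (x :: y :: t).dropLast) (acc := []),
          List.foldl_reverse]
      have hgo := alt_go_chars (x :: y :: t).dropLast (PySem.List.pyGetD (x :: y :: t) (-1) "")
      have hlen : (x :: y :: t).dropLast.length = (x :: y :: t).length - 1 := by
        simp [List.length_dropLast]
      rw [hlen] at hgo
      rw [List.nil_append, ← hgo]
      exact String.ofList_toList

-- ===== VERDICT (by name: the statement is the Claim_ definition above) =====
theorem mk_or_list_spec : Claim_equal_mk_or_list := by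
  intro l _
  exact mk_or_list_spec_aux l
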